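-- pv_equiv track=rewrite | github.com/raeez/topological-strings | scripts/quantum_shear_trace_diagram_normal_form.py | matchings
-- ===== SOURCE A (Python) =====
-- from typing import Dict, Iterable, Iterator, List, Sequence, Tuple
--
-- Word = Tuple[str, ...]
--
-- def inversion_pairs(word: Word) -> List[Tuple[int, int]]:
--     return [
--         (left, right)
--         for left, left_letter in enumerate(word)
--         if left_letter == "Y"
--         for right in range(left + 1, len(word))
--         if word[right] == "X"
--     ]
--
-- def matchings(word: Word) -> Iterator[Tuple[Tuple[int, int], ...]]:
--     pairs = inversion_pairs(word)
--
--     def rec(start: int, used: set[int], current: List[Tuple[int, int]]) -> Iterator[Tuple[Tuple[int, int], ...]]: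
--         yield tuple(current)
--         for index in range(start, len(pairs)):
--             left, right = pairs[index]
--             if left in used or right in used:
--                 continue
--             used.add(left)
--             used.add(right)
--             current.append((left, right))
--             yield from rec(index + 1, used, current)
--             current.pop()
--             used.remove(left)
--             used.remove(right)
--
--     yield from rec(0, set(), [])
-- ===== SOURCE B (Python) =====
-- from typing import Iterator, List, Tuple
--
-- Word = Tuple[str, ...]
--
-- def inversion_pairs(word: Word) -> List[Tuple[int, int]]:
--     return [
--         (left, right)
--         for left, left_letter in enumerate(word)
--         if left_letter == "Y"
--         for right in range(left + 1, len(word))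
--         if word[right] == "X"
--     ]
--
-- def matchings(word: Word) -> Iterator[Tuple[Tuple[int, int], ...]]:
--     # Iterative DFS with an explicit stack of immutable frames (start, used, current);
--     # children are pushed reversed so pops visit them in increasing pair-index order,
--     # reproducing the recursion's preorder.
--     pairs = inversion_pairs(word)
--     n = len(pairs)
--     stack = [(0, frozenset(), ())]
--     while stack:
--         start, used, current = stack.pop()
--         yield current
--         children = []
--         for j in range(start, n):
--             left, right = pairs[j]
--             if left not in used and right not in used:
--                 children.append((j + 1, used | {left, right}, current + ((left, right),)))
--         stack.extend(reversed(children))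
-- ===== Notes on version B (the rewrite author's own statement) =====
-- stated objective: alternative
-- what changed: The recursive generator with a shared mutable used-set/current-list is replaced by an iterative explicit-stack DFS over immutable frames (start, used, current), pushing children in reverse so the preorder of emitted matchings is preserved.
import Mathlib
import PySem

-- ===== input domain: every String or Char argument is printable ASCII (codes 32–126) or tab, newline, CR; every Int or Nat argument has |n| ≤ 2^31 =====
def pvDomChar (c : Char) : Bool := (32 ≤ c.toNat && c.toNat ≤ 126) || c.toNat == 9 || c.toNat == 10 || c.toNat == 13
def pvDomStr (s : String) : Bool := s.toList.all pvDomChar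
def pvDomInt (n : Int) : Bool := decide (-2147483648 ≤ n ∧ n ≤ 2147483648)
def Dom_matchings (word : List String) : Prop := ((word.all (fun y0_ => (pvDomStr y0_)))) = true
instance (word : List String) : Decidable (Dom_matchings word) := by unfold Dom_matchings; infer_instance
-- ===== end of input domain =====

-- B replaces A's recursive generator by an explicit-stack iterative DFS over immutable
-- frames, same preorder of emitted matchings (objective: alternative decomposition).
-- A's generator is ported as the list of all yielded values, in order.

-- ===== PORT A =====
-- inversion_pairs: list comprehension; word[right] is always in range (left+1 ≤ right < len),
-- so pyGetD with a dummy default is exact there.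
def invPairs (word : List String) : List (Int × Int) :=
  (PySem.List.enumerate word).flatMap (fun le =>
    if le.2 = "Y" then
      (PySem.List.pyRange (le.1 + 1) (word.length : Int) 1).filterMap (fun r =>
        if PySem.List.pyGetD word r "" = "X" then some (le.1, r) else none)
    else [])

-- A's rec: yield current, then the for-loop over index = start..len(pairs)-1 (the loop is
-- the structural recursion aloopA on the index). Python's mutate-then-restore of `used` and
-- `current` is the functional passing of the extended set/list into the recursive call only.
mutual
def recA (pairs : List (Int × Int)) (start : Nat) (used : PySem.Set Int)
    (cur : List (Int × Int)) : List (List (Int × Int)) :=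
  cur :: aloopA pairs start used cur
  termination_by 2 * (pairs.length - start) + 1
  decreasing_by omega
def aloopA (pairs : List (Int × Int)) (i : Nat) (used : PySem.Set Int)
    (cur : List (Int × Int)) : List (List (Int × Int)) :=
  if h : i < pairs.length then
    if PySem.Set.contains used (pairs[i]).1 || PySem.Set.contains used (pairs[i]).2 then
      aloopA pairs (i + 1) used cur
    else
      recA pairs (i + 1) (PySem.Set.add (PySem.Set.add used (pairs[i]).1) (pairs[i]).2)
          (cur ++ [pairs[i]])
        ++ aloopA pairs (i + 1) used cur
  else []
  termination_by 2 * (pairs.length - i)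
  decreasing_by all_goals omega
end

def matchings (word : List String) : List (List (Int × Int)) :=
  recA (invPairs word) 0 PySem.Set.empty []

-- ===== PORT B =====
-- A stack frame of B: (start index, used endpoints, current matching).
-- B's inner for-loop building `children` (append per valid j) is the structural
-- recursion childrenB over j.
def childrenB (pairs : List (Int × Int)) (j : Nat) (used : PySem.Set Int)
    (cur : List (Int × Int)) : List (Nat × PySem.Set Int × List (Int × Int)) :=
  if h : j < pairs.length then
    if PySem.Set.contains used (pairs[j]).1 || PySem.Set.contains used (pairs[j]).2 then
      childrenB pairs (j + 1) used cur
    else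
      (j + 1, PySem.Set.add (PySem.Set.add used (pairs[j]).1) (pairs[j]).2, cur ++ [pairs[j]])
        :: childrenB pairs (j + 1) used cur
  else []
termination_by pairs.length - j

-- Needed by bloopB's termination: the pushed children's total potential is below 2^(n-j).
theorem childrenB_sum_le (pairs : List (Int × Int)) (j : Nat) (used : PySem.Set Int)
    (cur : List (Int × Int)) :
    ((childrenB pairs j used cur).map (fun f => 2 ^ (pairs.length - f.1))).sum
      ≤ 2 ^ (pairs.length - j) - 1 := by
  rw [childrenB.eq_def]
  split
  · next h =>
    have ih := childrenB_sum_le pairs (j + 1) used cur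
    split
    · calc ((childrenB pairs (j+1) used cur).map (fun f => 2 ^ (pairs.length - f.1))).sum
          ≤ 2 ^ (pairs.length - (j+1)) - 1 := ih
        _ ≤ 2 ^ (pairs.length - j) - 1 :=
            Nat.sub_le_sub_right (Nat.pow_le_pow_right (by omega) (by omega)) 1
    · simp only [List.map_cons, List.sum_cons]
      have hp : pairs.length - j = (pairs.length - (j+1)) + 1 := by omega
      have h1 : 1 ≤ 2 ^ (pairs.length - (j+1)) := Nat.one_le_two_pow
      rw [hp, pow_succ]
      omega
  · simp
termination_by pairs.length - j

-- B's main loop: pop the top frame, emit its matching, push its children so that they are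
-- visited in increasing pair-index order. (Python keeps the top at the list's END and
-- extends with reversed(children); the port keeps the top at the HEAD and conses the
-- children in order — the same stack, orientation reversed.)
def bloopB (pairs : List (Int × Int))
    (stack : List (Nat × PySem.Set Int × List (Int × Int))) : List (List (Int × Int)) :=
  match stack with
  | [] => []
  | (s, u, c) :: rest => c :: bloopB pairs (childrenB pairs s u c ++ rest)
termination_by (stack.map (fun f => 2 ^ (pairs.length - f.1))).sum
decreasing_by
  simp only [List.map_append, List.sum_append, List.map_cons, List.sum_cons]
  have h1 := childrenB_sum_le pairs s u c
  have h2 : 1 ≤ 2 ^ (pairs.length - s) := Nat.one_le_two_pow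
  omega

def matchings_alt (word : List String) : List (List (Int × Int)) :=
  bloopB (invPairs word) [(0, PySem.Set.empty, [])]

-- ===== PRECONDITION & SPEC =====
def Spec_matchings (word : List String) (out : List (List (Int × Int))) : Prop := out = matchings_alt word
instance (word : List String) (out : List (List (Int × Int))) : Decidable (Spec_matchings word out) := by unfold Spec_matchings; infer_instance

-- ===== CLAIM (what is proved, stated in full; the proofs are below) =====
def Claim_equal_matchings : Prop := ∀ (word : List String), Dom_matchings word → Spec_matchings word (matchings word)

-- ===== LEMMAS AND PROOFS =====

-- A's loop from index i is exactly the flat-map of recA over B's child frames from i.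
theorem aloopA_eq (pairs : List (Int × Int)) (i : Nat) (used : PySem.Set Int)
    (cur : List (Int × Int)) :
    aloopA pairs i used cur
      = (childrenB pairs i used cur).flatMap (fun f => recA pairs f.1 f.2.1 f.2.2) := by
  rw [aloopA.eq_def, childrenB.eq_def]
  split
  · split
    · exact aloopA_eq pairs (i + 1) used cur
    · simp only [List.flatMap_cons]
      rw [aloopA_eq pairs (i + 1)]
  · simp
termination_by pairs.length - i

-- B's stack loop computes the concatenation of recA over its frames.
theorem bloopB_eq (pairs : List (Int × Int))
    (stack : List (Nat × PySem.Set Int × List (Int × Int))) :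
    bloopB pairs stack = stack.flatMap (fun f => recA pairs f.1 f.2.1 f.2.2) := by
  match stack with
  | [] => simp [bloopB]
  | (s, u, c) :: rest =>
    rw [bloopB, bloopB_eq pairs (childrenB pairs s u c ++ rest)]
    simp only [List.flatMap_append, List.flatMap_cons]
    rw [← aloopA_eq, recA.eq_def, List.cons_append]
termination_by (stack.map (fun f => 2 ^ (pairs.length - f.1))).sum
decreasing_by
  simp only [List.map_append, List.sum_append, List.map_cons, List.sum_cons]
  have h1 := childrenB_sum_le pairs s u c
  have h2 : 1 ≤ 2 ^ (pairs.length - s) := Nat.one_le_two_pow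
  omega

-- ===== VERDICT (by name: the statement is the Claim_ definition above) =====
theorem matchings_spec : Claim_equal_matchings := by
  intro word _
  unfold Spec_matchings matchings matchings_alt
  rw [bloopB_eq]
  simp
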